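-- pv_equiv track=rewrite | github.com/zarfix123/SRInternship | sol.py | build_matrix_table
-- ===== SOURCE A (Python) =====
-- def build_matrix_table(data: dict) -> str:
--     # Get sorted list of teams from both outer keys and all inner opponent keys
--     teams = set(data.keys())
--     for team_data in data.values():
--         teams.update(team_data.keys())
--     teams = sorted(teams)
--
--     # Calculate column width based on actual cell content
--     col_width = max(len(team) for team in teams)
--     col_width = max(col_width, 2)
--
--     # Scan all matchups to find the longest W-L string
--     for row_team in teams:
--         for col_team in teams:
--             if row_team != col_team:
--                 matchup = data.get(row_team, {}).get(col_team, {})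
--                 wins = matchup.get('W')
--                 losses = matchup.get('L')
--                 if wins is not None and losses is not None:
--                     cell_len = len(f"{wins}-{losses}")
--                     col_width = max(col_width, cell_len)
--
--     # Build the table
--     lines = []
--     separator = '-' * ((col_width + 1) * (len(teams) + 1) + 1)
--
--     header = f"{'Tm':<{col_width}}"
--     for team in teams:
--         header += f" {team:>{col_width}}"
--     lines.append(separator)
--     lines.append(header)
--     lines.append(separator)
--
--     for row_team in teams:
--         row = f"{row_team:<{col_width}}"
--         for col_team in teams:
--             if row_team == col_team:
--                 cell = "--"
--             else:
--                 matchup = data.get(row_team, {}).get(col_team, {})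
--                 wins = matchup.get('W')
--                 losses = matchup.get('L')
--
--                 if wins is None or losses is None:
--                     cell = "NA"
--                 else:
--                     cell = f"{wins}-{losses}"
--             row += f" {cell:>{col_width}}"
--         lines.append(row)
--
--     lines.append(separator)
--
--     return '\n'.join(lines)
-- ===== SOURCE B (Python) =====
-- def build_matrix_table(data: dict) -> str:
--     # collect and sort team names (outer keys plus all inner opponent keys)
--     teams = set(data.keys())
--     for team_data in data.values():
--         teams.update(team_data.keys())
--     teams = sorted(teams)
--
--     def cell(r, c):
--         if r == c:
--             return "--"
--         m = data.get(r, {}).get(c, {})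
--         w, l = m.get('W'), m.get('L')
--         return "NA" if w is None or l is None else f"{w}-{l}"
--
--     # column-major layout: a label column, then one resolved column per team
--     cols = [["Tm"] + teams] + [[c] + [cell(r, c) for r in teams] for c in teams]
--     width = max([2] + [len(s) for col in cols for s in col])
--     padded = [[s.ljust(width) for s in cols[0]]] + \
--              [[s.rjust(width) for s in col] for col in cols[1:]]
--
--     # transpose the padded columns into the printed rows
--     rows = [' '.join(row) for row in zip(*padded)]
--
--     sep = '-' * ((width + 1) * len(cols) + 1)
--     return '\n'.join([sep, rows[0], sep] + rows[1:] + [sep])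
-- ===== Notes on version B (the rewrite author's own statement) =====
-- stated objective: alternative
-- what changed: A measures width with a dedicated nested matchup scan and then renders row by row with repeated string +=; B lays the table out column-major (a label column plus one resolved column per team), takes the width as one max over every entry of the built columns, and produces the printed rows by transposing the padded columns with zip(*cols).
-- outside the precondition, e.g. on build_matrix_table({}): A raises ValueError, B returns '----\nTm\n----\n----'
import Mathlib
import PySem

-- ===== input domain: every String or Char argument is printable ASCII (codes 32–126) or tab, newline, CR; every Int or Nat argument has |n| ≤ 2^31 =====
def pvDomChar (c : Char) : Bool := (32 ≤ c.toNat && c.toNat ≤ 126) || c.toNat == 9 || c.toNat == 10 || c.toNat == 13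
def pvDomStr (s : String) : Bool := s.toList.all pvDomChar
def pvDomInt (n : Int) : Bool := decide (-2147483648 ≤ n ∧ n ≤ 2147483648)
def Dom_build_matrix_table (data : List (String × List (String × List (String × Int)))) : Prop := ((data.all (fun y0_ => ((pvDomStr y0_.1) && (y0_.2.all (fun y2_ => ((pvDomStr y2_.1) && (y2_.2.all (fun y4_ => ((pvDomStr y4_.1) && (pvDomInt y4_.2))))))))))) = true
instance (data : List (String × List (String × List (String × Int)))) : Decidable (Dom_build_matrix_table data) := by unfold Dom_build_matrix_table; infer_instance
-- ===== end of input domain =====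

-- B lays the table out column-major (label column + one resolved column per team), measures the
-- width over the built columns, and transposes the padded columns into rows; A width-scans the
-- matchups and renders row by row with repeated +=.  Return value only; no mutation.

-- shared helpers (lines identical in both Pythons: team collection, dict lookups, the f"{w}-{l}" cell text)
def teamsOf (data : List (String × List (String × List (String × Int)))) : List String :=
  PySem.List.sorted
    (data.foldl (fun s td => PySem.Set.update s (td.2.map Prod.fst))
      (PySem.Set.ofList (data.map Prod.fst)))
    (fun x => x) false

-- data.get(r, {}).get(c, {})
def matchupOf (data : List (String × List (String × List (String × Int)))) (r c : String) :
    List (String × Int) :=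
  PySem.Dict.getD (PySem.Dict.mk (PySem.Dict.getD (PySem.Dict.mk data) r [])) c []

-- f"{w}-{l}"
def wlChars (w l : Int) : List Char := PySem.Int.toChars w ++ '-' :: PySem.Int.toChars l

-- the cell text of A's row loop / B's cell helper (same branches in the same order)
def cellOf (data : List (String × List (String × List (String × Int)))) (r c : String) :
    List Char :=
  if r = c then ['-', '-']
  else
    match PySem.Dict.get? (PySem.Dict.mk (matchupOf data r c)) "W",
          PySem.Dict.get? (PySem.Dict.mk (matchupOf data r c)) "L" with
    | some w, some l => wlChars w l
    | _, _ => ['N', 'A']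

-- f"{s:<{w}}" / f"{s:>{w}}" (str.ljust / str.rjust)
def padL (w : Nat) (s : List Char) : List Char := s ++ List.replicate (w - s.length) ' '
def padR (w : Nat) (s : List Char) : List Char := List.replicate (w - s.length) ' ' ++ s

-- ===== PORT A =====
def build_matrix_table (data : List (String × List (String × List (String × Int)))) : String :=
  let teams := teamsOf data
  -- max(len(team) for team in teams): raises ValueError on an empty dict (excluded by Pre_)
  let w0 := (PySem.List.max? (teams.map (fun t => t.toList.length)) (fun y => y)).getD 0
  let w1 := max w0 2
  -- the matchup-measuring scan
  let cw := teams.foldl (fun acc r => teams.foldl (fun acc c =>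
      if r ≠ c then
        match PySem.Dict.get? (PySem.Dict.mk (matchupOf data r c)) "W",
              PySem.Dict.get? (PySem.Dict.mk (matchupOf data r c)) "L" with
        | some wi, some li => max acc (wlChars wi li).length
        | _, _ => acc
      else acc) acc) w1
  let sep : List Char := List.replicate ((cw + 1) * (teams.length + 1) + 1) '-'
  let header := teams.foldl (fun acc t => acc ++ ' ' :: padR cw t.toList) (padL cw ['T', 'm'])
  let lines := [sep, header, sep]
  let lines := teams.foldl (fun ls r =>
      ls ++ [teams.foldl (fun acc c => acc ++ ' ' :: padR cw (cellOf data r c)) (padL cw r.toList)])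
      lines
  String.ofList (PySem.Chars.join ['\n'] (lines ++ [sep]))

-- ===== PORT B =====
-- ' '.join per row of zip(*padded): strip the head of every column until the first column is
-- exhausted (B only ever applies it to columns of equal length, where this is exactly zip)
def stripRows (cols : List (List (List Char))) : List (List Char) :=
  match cols with
  | [] => []
  | c0 :: rest =>
    match c0 with
    | [] => []
    | x :: t =>
      PySem.Chars.join [' '] (((x :: t) :: rest).map (fun col => col.headD [])) ::
      stripRows (((x :: t) :: rest).map (fun col => col.drop 1))
termination_by (cols.headD []).length
decreasing_by simp

def build_matrix_table_alt (data : List (String × List (String × List (String × Int)))) : String :=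
  let teams := teamsOf data
  -- cols = [["Tm"] + teams] + [[c] + [cell(r, c) for r in teams] for c in teams]
  let cols := (['T', 'm'] :: teams.map String.toList) ::
      teams.map (fun c => c.toList :: teams.map (fun r => cellOf data r c))
  -- width = max([2] + [len(s) for col in cols for s in col])
  let width := (cols.flatMap (fun col => col.map List.length)).foldl max 2
  let padded := (cols.headD []).map (padL width) ::
      (cols.drop 1).map (fun col => col.map (padR width))
  let rows := stripRows padded
  let sep : List Char := List.replicate ((width + 1) * cols.length + 1) '-'
  String.ofList (PySem.Chars.join ['\n'] ([sep, rows.headD [], sep] ++ rows.drop 1 ++ [sep]))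

-- ===== PRECONDITION & SPEC =====
-- Pre_ excludes only the empty dict, on which A's 'max(len(team) for team in teams)' raises ValueError.
def Pre_build_matrix_table (data : List (String × List (String × List (String × Int)))) : Prop :=
  data ≠ []
instance (data : List (String × List (String × List (String × Int)))) : Decidable (Pre_build_matrix_table data) := by unfold Pre_build_matrix_table; infer_instance

def pvWitness_build_matrix_table : (List (String × List (String × List (String × Int)))) :=
  [("A", [("B", [("W", (1 : Int)), ("L", (2 : Int))])])]

def Spec_build_matrix_table (data : List (String × List (String × List (String × Int)))) (out : String) : Prop := out = build_matrix_table_alt data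
instance (data : List (String × List (String × List (String × Int)))) (out : String) : Decidable (Spec_build_matrix_table data out) := by unfold Spec_build_matrix_table; infer_instance

-- ===== CLAIM (what is proved, stated in full; the proofs are below) =====
def Claim_equal_build_matrix_table : Prop := ∀ (data : List (String × List (String × List (String × Int)))), Dom_build_matrix_table data → Pre_build_matrix_table data → Spec_build_matrix_table data (build_matrix_table data)

-- ===== LEMMAS AND PROOFS =====

-- teams nonempty machinery
theorem set_add_ne_nil {α : Type} [BEq α] (s : PySem.Set α) (x : α) (h : s ≠ []) :
    PySem.Set.add s x ≠ [] := by
  simp only [PySem.Set.add]; split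
  · exact h
  · simp

theorem foldl_set_add_ne_nil {α : Type} [BEq α] (l : List α) (s : PySem.Set α) (h : s ≠ []) :
    l.foldl PySem.Set.add s ≠ [] := by
  induction l generalizing s with
  | nil => exact h
  | cons x t ih => exact ih _ (set_add_ne_nil s x h)

theorem foldl_update_ne_nil {α β : Type} [BEq α] (g : β → List α) (l : List β)
    (s : PySem.Set α) (h : s ≠ []) :
    l.foldl (fun s td => PySem.Set.update s (g td)) s ≠ [] := by
  induction l generalizing s with
  | nil => exact h
  | cons x t ih =>
      exact ih _ (by simpa [PySem.Set.update] using foldl_set_add_ne_nil (g x) s h)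

theorem teamsOf_ne_nil (data : List (String × List (String × List (String × Int))))
    (h : data ≠ []) : teamsOf data ≠ [] := by
  unfold teamsOf
  rw [Ne, PySem.List.sorted_eq_nil_iff]
  obtain ⟨d, t, rfl⟩ := List.exists_cons_of_ne_nil h
  apply foldl_update_ne_nil
  rw [PySem.Set.ofList_eq_foldl]
  simp only [List.map, List.foldl]
  apply foldl_set_add_ne_nil
  simp [PySem.Set.add]

-- max algebra: msup l = the supremum of a list of lengths
def msup (l : List Nat) : Nat := l.foldr max 0

theorem msup_cons (x : Nat) (l : List Nat) : msup (x :: l) = max x (msup l) := rfl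

theorem msup_append (l1 l2 : List Nat) : msup (l1 ++ l2) = max (msup l1) (msup l2) := by
  induction l1 with
  | nil => simp [msup]
  | cons x t ih => simp only [List.cons_append, msup_cons, ih]; omega

theorem foldl_max_eq_msup {α : Type} (g : α → Nat) (l : List α) (a : Nat) :
    l.foldl (fun acc x => max acc (g x)) a = max a (msup (l.map g)) := by
  induction l generalizing a with
  | nil => simp [msup]
  | cons x t ih => simp only [List.foldl_cons, List.map_cons, msup_cons, ih]; omega

theorem foldl_max_id_eq_msup (l : List Nat) (a : Nat) :
    l.foldl max a = max a (msup l) := by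
  have := foldl_max_eq_msup (fun x => x) l a
  simpa using this

theorem msup_flatMap {α : Type} (f : α → List Nat) (l : List α) :
    msup (l.flatMap f) = msup (l.map (fun x => msup (f x))) := by
  induction l with
  | nil => rfl
  | cons x t ih => rw [List.flatMap_cons, msup_append, List.map_cons, msup_cons, ih]

theorem msup_map_max {α : Type} (g h : α → Nat) (l : List α) :
    msup (l.map (fun x => max (g x) (h x))) = max (msup (l.map g)) (msup (l.map h)) := by
  induction l with
  | nil => simp [msup]
  | cons x t ih => simp only [List.map_cons, msup_cons, ih]; omega

theorem msup_swap {α β : Type} (f : α → β → Nat) (R : List α) (C : List β) :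
    msup (C.map (fun c => msup (R.map (fun r => f r c)))) =
    msup (R.map (fun r => msup (C.map (fun c => f r c)))) := by
  induction C with
  | nil =>
      simp only [List.map_nil]
      induction R with
      | nil => rfl
      | cons r t ih => rw [List.map_cons, msup_cons, ← ih]; rfl
  | cons c cs ih =>
      rw [List.map_cons, msup_cons, ih,
        ← msup_map_max (fun r => f r c) (fun r => msup (cs.map (fun c => f r c))) R]
      exact congrArg msup (List.map_congr_left (fun r _ => by rw [List.map_cons, msup_cons]))

-- the per-cell step of A's matchup scan, and the measure-every-cell step it agrees with
def stepB (data : List (String × List (String × List (String × Int))))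
    (r : String) (a : Nat) (c : String) : Nat := max a (cellOf data r c).length

def stepA (data : List (String × List (String × List (String × Int))))
    (r : String) (a : Nat) (c : String) : Nat :=
  if r ≠ c then
    match PySem.Dict.get? (PySem.Dict.mk (matchupOf data r c)) "W",
          PySem.Dict.get? (PySem.Dict.mk (matchupOf data r c)) "L" with
    | some wi, some li => max a (wlChars wi li).length
    | _, _ => a
  else a

-- measuring every cell agrees with measuring only full W-L cells once the accumulator is ≥ 2
theorem step_eq (data : List (String × List (String × List (String × Int))))
    (r c : String) (a : Nat) (h2 : 2 ≤ a) : stepB data r a c = stepA data r a c := by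
  unfold stepA stepB cellOf
  by_cases hrc : r = c
  · simp [hrc, Nat.max_eq_left h2]
  · simp only [ne_eq, hrc, not_false_eq_true, if_true]
    rcases PySem.Dict.get? (PySem.Dict.mk (matchupOf data r c)) "W" with _ | wi <;>
      rcases PySem.Dict.get? (PySem.Dict.mk (matchupOf data r c)) "L" with _ | li <;>
      simp [Nat.max_eq_left h2]

theorem two_le_stepB (data : List (String × List (String × List (String × Int))))
    (r c : String) (a : Nat) (h2 : 2 ≤ a) : 2 ≤ stepB data r a c :=
  le_trans h2 (Nat.le_max_left _ _)

theorem width_inner (data : List (String × List (String × List (String × Int))))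
    (r : String) (cs : List String) (acc : Nat) (h2 : 2 ≤ acc) :
    List.foldl (stepB data r) acc cs = List.foldl (stepA data r) acc cs := by
  induction cs generalizing acc with
  | nil => rfl
  | cons c t ih =>
      rw [List.foldl_cons, List.foldl_cons, ← step_eq data r c acc h2]
      exact ih _ (two_le_stepB data r c acc h2)

theorem width_outer (data : List (String × List (String × List (String × Int))))
    (cs rs : List String) (acc : Nat) (h2 : 2 ≤ acc) :
    List.foldl (fun a r => List.foldl (stepB data r) a cs) acc rs =
    List.foldl (fun a r => List.foldl (stepA data r) a cs) acc rs := by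
  induction rs generalizing acc with
  | nil => rfl
  | cons r t ih =>
      rw [List.foldl_cons, List.foldl_cons]
      rw [show List.foldl (stepB data r) acc cs = List.foldl (stepA data r) acc cs from
        width_inner data r cs acc h2]
      refine ih _ ?_
      rw [← width_inner data r cs acc h2]
      exact le_trans h2
        (PySem.List.le_foldl_max_nat cs (fun c => (cellOf data r c).length) acc).1

-- A's nested width scan as a closed max expression
theorem widthA_closed (data : List (String × List (String × List (String × Int))))
    (T : List String) (a : Nat) (h2 : 2 ≤ a) :
    T.foldl (fun acc r => List.foldl (stepA data r) acc T) a =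
    max a (msup (T.map (fun r => msup (T.map (fun c => (cellOf data r c).length))))) := by
  rw [← width_outer data T T a h2]
  have h : ∀ (rs : List String) (acc : Nat),
      rs.foldl (fun a r => List.foldl (stepB data r) a T) acc =
      max acc (msup (rs.map (fun r => msup (T.map (fun c => (cellOf data r c).length))))) := by
    intro rs
    induction rs with
    | nil => intro acc; simp [msup]
    | cons r t ih =>
        intro acc
        rw [List.foldl_cons, List.map_cons, msup_cons, ih,
          show List.foldl (stepB data r) acc T =
            max acc (msup (T.map (fun c => (cellOf data r c).length))) from
            foldl_max_eq_msup _ T acc]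
        omega
  exact h T a

-- ' '.join(first :: parts) is exactly A's 'out += " " + part' loop
theorem join_append_cons (sep a b : List Char) (rest : List (List Char)) :
    PySem.Chars.join sep ((a ++ b) :: rest) = a ++ PySem.Chars.join sep (b :: rest) := by
  cases rest with
  | nil => simp [PySem.Chars.join_singleton]
  | cons q t => rw [PySem.Chars.join_cons_cons, PySem.Chars.join_cons_cons]; simp

theorem foldl_sep_join {α : Type} (f : α → List Char) (l : List α) (init : List Char) :
    List.foldl (fun acc x => acc ++ ' ' :: f x) init l =
    PySem.Chars.join [' '] (init :: l.map f) := by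
  induction l generalizing init with
  | nil => simp [PySem.Chars.join_singleton]
  | cons x t ih =>
      rw [List.map_cons, List.foldl_cons, ih,
        show init ++ ' ' :: f x = (init ++ [' ']) ++ f x by simp,
        join_append_cons, PySem.Chars.join_cons_cons]

-- A's line assembly as explicit joined lines
theorem lines_eq (data : List (String × List (String × List (String × Int))))
    (T : List String) (W : Nat) (sep : List Char) :
    (T.foldl (fun ls r =>
        ls ++ [T.foldl (fun acc c => acc ++ ' ' :: padR W (cellOf data r c)) (padL W r.toList)])
      [sep, T.foldl (fun acc t => acc ++ ' ' :: padR W t.toList) (padL W ['T', 'm']), sep]) ++ [sep]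
    = [sep, PySem.Chars.join [' '] (padL W ['T', 'm'] :: T.map (fun t => padR W t.toList)), sep] ++
      T.map (fun r =>
        PySem.Chars.join [' '] (padL W r.toList :: T.map (fun c => padR W (cellOf data r c)))) ++
      [sep] := by
  rw [PySem.List.foldl_append_singleton_eq_map,
    foldl_sep_join (fun t => padR W t.toList) T (padL W ['T', 'm'])]
  rw [show T.map (fun r =>
        T.foldl (fun acc c => acc ++ ' ' :: padR W (cellOf data r c)) (padL W r.toList)) =
      T.map (fun r =>
        PySem.Chars.join [' '] (padL W r.toList :: T.map (fun c => padR W (cellOf data r c)))) from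
    List.map_congr_left (fun r _ => foldl_sep_join (fun c => padR W (cellOf data r c)) T _)]

-- one step of the transpose loop
theorem stripRows_cons (a0 : List Char) (l0 : List (List Char)) (C : List (List (List Char))) :
    stripRows ((a0 :: l0) :: C) =
    PySem.Chars.join [' '] (a0 :: C.map (fun col => col.headD [])) ::
    stripRows (l0 :: C.map (fun col => col.drop 1)) := by
  rw [stripRows.eq_def]
  simp

-- the transpose loop on columns of shape 'head :: mapped tail'
theorem stripRows_maps {α : Type} (R : List α) (f0 : α → List Char) (C : List α)
    (f : α → α → List Char) :
    stripRows (R.map f0 :: C.map (fun c => R.map (f c))) =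
    R.map (fun r => PySem.Chars.join [' '] (f0 r :: C.map (fun c => f c r))) := by
  induction R with
  | nil => rw [stripRows.eq_def]; simp
  | cons r rs ih =>
      simp only [List.map_cons]
      rw [stripRows_cons (f0 r) (rs.map f0) (C.map (fun c => f c r :: rs.map (f c)))]
      simp only [List.map_map, Function.comp_def, List.headD_cons, List.drop_succ_cons,
        List.drop_zero]
      rw [ih]

-- ===== VERDICT (by name: the statement is the Claim_ definition above) =====
theorem build_matrix_table_spec : Claim_equal_build_matrix_table := by
  intro data _ hpre
  unfold Spec_build_matrix_table build_matrix_table build_matrix_table_alt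
  dsimp only
  have hT := teamsOf_ne_nil data hpre
  set T := teamsOf data with hTdef
  obtain ⟨t0, ts, hTe⟩ := List.exists_cons_of_ne_nil hT
  -- the two widths agree
  set N := msup (T.map (fun t => t.toList.length)) with hN
  set S := msup (T.map (fun r => msup (T.map (fun c => (cellOf data r c).length)))) with hS
  have hwB :
      ((((['T', 'm'] :: T.map String.toList) ::
          T.map (fun c => c.toList :: T.map (fun r => cellOf data r c))).flatMap
            (fun col => col.map List.length)).foldl max 2) = max 2 (max N S) := by
    rw [foldl_max_id_eq_msup, msup_flatMap]
    simp only [List.map_cons, List.map_map, Function.comp_def, msup_cons, List.length_cons,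
      List.length_nil]
    rw [show (fun c : String => max c.toList.length
          (msup (T.map (fun r => (cellOf data r c).length)))) =
        (fun c : String => max ((fun c : String => c.toList.length) c)
          ((fun c => msup (T.map (fun r => (cellOf data r c).length))) c)) from rfl,
      msup_map_max (fun c : String => c.toList.length)
        (fun c => msup (T.map (fun r => (cellOf data r c).length))) T,
      msup_swap (fun r c => (cellOf data r c).length) T T, ← hN, ← hS]
    omega
  have hwA :
      T.foldl (fun acc r => List.foldl (stepA data r) acc T)
        (max ((PySem.List.max? (T.map (fun t => t.toList.length)) (fun y => y)).getD 0) 2) =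
      max 2 (max N S) := by
    have hmax? : (PySem.List.max? (T.map (fun t => t.toList.length)) (fun y => y)).getD 0 = N := by
      rw [hN, hTe]
      simp only [List.map_cons, PySem.List.max?_id_cons, Option.getD_some]
      rw [foldl_max_id_eq_msup, msup_cons]
    rw [hmax?, widthA_closed data T (max N 2) (Nat.le_max_right _ _), ← hS]
    omega
  rw [show (T.foldl (fun acc r => T.foldl (fun acc c =>
      if r ≠ c then
        match PySem.Dict.get? (PySem.Dict.mk (matchupOf data r c)) "W",
              PySem.Dict.get? (PySem.Dict.mk (matchupOf data r c)) "L" with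
        | some wi, some li => max acc (wlChars wi li).length
        | _, _ => acc
      else acc) acc)
      (max ((PySem.List.max? (T.map (fun t => t.toList.length)) (fun y => y)).getD 0) 2)) =
      max 2 (max N S) from hwA, hwB]
  set W := max 2 (max N S) with hW
  -- the B side: evaluate the transpose of the padded columns
  have hpadded :
      ((((['T', 'm'] :: T.map String.toList) ::
          T.map (fun c => c.toList :: T.map (fun r => cellOf data r c))).headD []).map (padL W) ::
        (((['T', 'm'] :: T.map String.toList) ::
          T.map (fun c => c.toList :: T.map (fun r => cellOf data r c))).drop 1).map
            (fun col => col.map (padR W))) =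
      ((padL W ['T', 'm'] :: T.map (fun t => padL W t.toList)) ::
        T.map (fun c => padR W c.toList :: T.map (fun r => padR W (cellOf data r c)))) := by
    simp [List.map_map, Function.comp_def]
  rw [hpadded]
  have hrows :
      stripRows ((padL W ['T', 'm'] :: T.map (fun t => padL W t.toList)) ::
          T.map (fun c => padR W c.toList :: T.map (fun r => padR W (cellOf data r c)))) =
      PySem.Chars.join [' '] (padL W ['T', 'm'] :: T.map (fun t => padR W t.toList)) ::
        T.map (fun r =>
          PySem.Chars.join [' '] (padL W r.toList :: T.map (fun c => padR W (cellOf data r c)))) := by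
    rw [show T.map (fun c => padR W c.toList :: T.map (fun r => padR W (cellOf data r c))) =
        T.map (fun c => (fun col => padR W c.toList :: T.map (fun r => padR W (cellOf data r c))) c)
        from rfl]
    rw [stripRows_cons (padL W ['T', 'm']) (T.map (fun t => padL W t.toList)) _]
    simp only [List.map_map, Function.comp_def, List.headD_cons, List.drop_succ_cons,
      List.drop_zero]
    rw [stripRows_maps T (fun t => padL W t.toList) T (fun c r => padR W (cellOf data r c))]
  rw [hrows]
  simp only [List.headD_cons, List.drop_succ_cons, List.drop_zero, List.length_cons,
    List.length_map]
  exact congrArg String.ofList (congrArg (PySem.Chars.join ['\n'])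
    (lines_eq data T W (List.replicate ((W + 1) * (T.length + 1) + 1) '-')))
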